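-- pv_equiv track=rewrite | github.com/andygunter/hello-world | job_matcher/core/matcher.py | _skills_match
-- ===== SOURCE A (Python) =====
-- def _skills_match(skill1: str, skill2: str) -> bool:
--     """Check if two skill names match (including variants)."""
--     # Exact match
--     if skill1 == skill2:
--         return True
--
--     # Common variations
--     variations = {
--         "javascript": ["js", "ecmascript"],
--         "typescript": ["ts"],
--         "python": ["py"],
--         "kubernetes": ["k8s"],
--         "postgresql": ["postgres", "psql"],
--         "mongodb": ["mongo"],
--         "react": ["reactjs", "react.js"],
--         "node.js": ["nodejs", "node"],
--         "machine learning": ["ml"],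
--         "artificial intelligence": ["ai"],
--         "amazon web services": ["aws"],
--         "google cloud platform": ["gcp"],
--         "continuous integration": ["ci"],
--         "continuous deployment": ["cd"],
--         "ci/cd": ["cicd", "ci cd"],
--     }
--
--     for base, variants in variations.items():
--         if skill1 == base and skill2 in variants:
--             return True
--         if skill2 == base and skill1 in variants:
--             return True
--         if skill1 in variants and skill2 in variants:
--             return True
--
--     # Substring match for compound skills
--     if len(skill1) > 3 and len(skill2) > 3:
--         if skill1 in skill2 or skill2 in skill1:
--             return True
--
--     return False
-- ===== SOURCE B (Python) =====
-- # B: one precomputed reverse-lookup table (variant/base -> canonical base) replaces A's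
-- # per-call scan over all variation groups; variant check stays before the substring check.
-- _VARIATIONS = {
--     "javascript": ["js", "ecmascript"],
--     "typescript": ["ts"],
--     "python": ["py"],
--     "kubernetes": ["k8s"],
--     "postgresql": ["postgres", "psql"],
--     "mongodb": ["mongo"],
--     "react": ["reactjs", "react.js"],
--     "node.js": ["nodejs", "node"],
--     "machine learning": ["ml"],
--     "artificial intelligence": ["ai"],
--     "amazon web services": ["aws"],
--     "google cloud platform": ["gcp"],
--     "continuous integration": ["ci"],
--     "continuous deployment": ["cd"],
--     "ci/cd": ["cicd", "ci cd"],
-- }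
--
-- _CANON = {}
-- for _base, _variants in _VARIATIONS.items():
--     _CANON[_base] = _base
--     for _v in _variants:
--         _CANON[_v] = _base
--
--
-- def _skills_match(skill1: str, skill2: str) -> bool:
--     """Check if two skill names match (including variants)."""
--     if skill1 == skill2:
--         return True
--     c1 = _CANON.get(skill1)
--     if c1 is not None and c1 == _CANON.get(skill2):
--         return True
--     if len(skill1) > 3 and len(skill2) > 3 and (skill1 in skill2 or skill2 in skill1):
--         return True
--     return False
-- ===== Notes on version B (the rewrite author's own statement) =====
-- stated objective: simpler
-- what changed: Replaces A's per-call linear scan over all variation groups (three list-membership tests per group) by a reverse-lookup dict built once that maps every base and variant to its canonical base; after the exact-match guard both skills are looked up once and their canonical bases compared, then the unchanged substring check.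
import Mathlib
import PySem

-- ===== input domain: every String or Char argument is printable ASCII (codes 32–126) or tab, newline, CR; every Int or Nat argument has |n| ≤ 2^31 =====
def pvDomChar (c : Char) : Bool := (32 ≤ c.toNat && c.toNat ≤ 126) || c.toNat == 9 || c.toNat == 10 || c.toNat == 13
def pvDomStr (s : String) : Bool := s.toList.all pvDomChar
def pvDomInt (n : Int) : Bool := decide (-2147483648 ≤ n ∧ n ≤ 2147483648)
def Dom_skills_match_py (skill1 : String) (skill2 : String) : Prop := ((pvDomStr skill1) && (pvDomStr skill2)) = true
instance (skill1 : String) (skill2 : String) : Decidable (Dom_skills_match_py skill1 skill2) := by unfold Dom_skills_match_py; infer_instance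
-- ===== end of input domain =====

-- B replaces A's per-call scan over variation groups by a reverse-lookup dict built once; same results.


-- the common variations table (dict literal in both Pythons)
def pvVariations : List (String × List String) :=
  [("javascript", ["js", "ecmascript"]),
   ("typescript", ["ts"]),
   ("python", ["py"]),
   ("kubernetes", ["k8s"]),
   ("postgresql", ["postgres", "psql"]),
   ("mongodb", ["mongo"]),
   ("react", ["reactjs", "react.js"]),
   ("node.js", ["nodejs", "node"]),
   ("machine learning", ["ml"]),
   ("artificial intelligence", ["ai"]),
   ("amazon web services", ["aws"]),
   ("google cloud platform", ["gcp"]),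
   ("continuous integration", ["ci"]),
   ("continuous deployment", ["cd"]),
   ("ci/cd", ["cicd", "ci cd"])]

-- ===== PORT A =====
-- A's loop 'for base, variants in variations.items(): …' with its three early-return tests
def pvLoopA (s1 s2 : String) : List (String × List String) → Bool
  | [] => false
  | (b, vs) :: rest =>
    if s1 == b && vs.contains s2 then true
    else if s2 == b && vs.contains s1 then true
    else if vs.contains s1 && vs.contains s2 then true
    else pvLoopA s1 s2 rest

def skills_match_py (skill1 : String) (skill2 : String) : Bool :=
  if skill1 == skill2 then true
  else if pvLoopA skill1 skill2 pvVariations then true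
  else if 3 < PySem.Str.len skill1 ∧ 3 < PySem.Str.len skill2 then
    if PySem.Str.isIn skill1 skill2 || PySem.Str.isIn skill2 skill1 then true
    else false
  else false

-- ===== PORT B =====
-- the module-level loop building _CANON from _VARIATIONS
def pvCanon : PySem.Dict String String :=
  pvVariations.foldl
    (fun d p => p.2.foldl (fun d v => d.insert v p.1) (d.insert p.1 p.1))
    PySem.Dict.empty

def skills_match_py_alt (skill1 : String) (skill2 : String) : Bool :=
  if skill1 == skill2 then true
  else
    let c1 := pvCanon.get? skill1
    if c1.isSome && c1 == pvCanon.get? skill2 then true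
    else if 3 < PySem.Str.len skill1 ∧ 3 < PySem.Str.len skill2 ∧
            (PySem.Str.isIn skill1 skill2 || PySem.Str.isIn skill2 skill1) then true
    else false

-- ===== PRECONDITION & SPEC =====
def Spec_skills_match_py (skill1 : String) (skill2 : String) (out : Bool) : Prop := out = skills_match_py_alt skill1 skill2
instance (skill1 : String) (skill2 : String) (out : Bool) : Decidable (Spec_skills_match_py skill1 skill2 out) := by unfold Spec_skills_match_py; infer_instance

-- ===== CLAIM (what is proved, stated in full; the proofs are below) =====
def Claim_equal_skills_match_py : Prop := ∀ (skill1 : String) (skill2 : String), Dom_skills_match_py skill1 skill2 → Spec_skills_match_py skill1 skill2 (skills_match_py skill1 skill2)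

-- ===== LEMMAS AND PROOFS =====

-- all names (bases and variants) of a variations list, flattened
def pvFlatKeys (L : List (String × List String)) : List String :=
  L.flatMap (fun p => p.1 :: p.2)

-- first group (if any) whose base or variant list contains s, as its base
def pvAssocCanon (s : String) : List (String × List String) → Option String
  | [] => none
  | (b, vs) :: rest => if s == b || vs.contains s then some b else pvAssocCanon s rest

lemma pvFlatKeys_cons (b : String) (vs : List String) (rest : List (String × List String)) :
    pvFlatKeys ((b, vs) :: rest) = (b :: vs) ++ pvFlatKeys rest := rfl

lemma pvAssocCanon_of_not_mem (s : String) (L : List (String × List String))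
    (h : s ∉ pvFlatKeys L) : pvAssocCanon s L = none := by
  induction L with
  | nil => rfl
  | cons p rest ih =>
    obtain ⟨b, vs⟩ := p
    rw [pvFlatKeys_cons] at h
    simp only [List.mem_append, List.mem_cons, not_or] at h
    obtain ⟨⟨hb, hv⟩, hrest⟩ := h
    simp [pvAssocCanon, hb, hv, ih hrest]

lemma pvAssocCanon_mem (s c : String) (L : List (String × List String))
    (h : pvAssocCanon s L = some c) : c ∈ pvFlatKeys L := by
  induction L with
  | nil => simp [pvAssocCanon] at h
  | cons p rest ih =>
    obtain ⟨b, vs⟩ := p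
    rw [pvFlatKeys_cons]
    simp only [pvAssocCanon] at h
    by_cases hc : (s == b || vs.contains s) = true
    · rw [if_pos hc] at h
      simp [Option.some_inj.mp h]
    · rw [if_neg hc] at h
      simp [ih h]

-- lookup through an inner fold of inserts with a constant value
lemma pvGet_foldl_insert (vs : List String) (b : String) (d : PySem.Dict String String) (s : String) :
    (vs.foldl (fun d v => d.insert v b) d).get? s
      = if vs.contains s then some b else d.get? s := by
  induction vs generalizing d with
  | nil => simp
  | cons v rest ih =>
    simp only [List.foldl_cons, ih]
    by_cases hv : s = v
    · subst hv
      by_cases hr : rest.contains s <;>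
        simp [PySem.Dict.get?_insert_self]
    · by_cases hr : rest.contains s <;>
        simp [PySem.Dict.get?_insert_of_ne _ _ hv, hv]

-- lookup in the dict built by B's module-level loop
lemma pvGet_build (L : List (String × List String)) (d : PySem.Dict String String) (s : String)
    (hnd : (pvFlatKeys L).Nodup) :
    (L.foldl (fun d p => p.2.foldl (fun d v => d.insert v p.1) (d.insert p.1 p.1)) d).get? s
      = match pvAssocCanon s L with
        | some c => some c
        | none => d.get? s := by
  induction L generalizing d with
  | nil => rfl
  | cons p rest ih =>
    obtain ⟨b, vs⟩ := p
    rw [pvFlatKeys_cons, List.nodup_append] at hnd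
    obtain ⟨hhead, hnd', hdisj⟩ := hnd
    simp only [List.foldl_cons, ih _ hnd']
    by_cases hm : (s == b || vs.contains s) = true
    · -- s is in the head group; it cannot be in the rest (Nodup)
      have hsmem : s ∈ b :: vs := by
        rcases Bool.or_eq_true_iff.mp hm with h | h
        · simp [beq_iff_eq.mp h]
        · simp [List.contains_iff_mem.mp h]
      have hnot : s ∉ pvFlatKeys rest := fun hmem => hdisj s hsmem s hmem rfl
      rw [pvAssocCanon_of_not_mem s rest hnot]
      have hv : (vs.foldl (fun d v => d.insert v b) (d.insert b b)).get? s = some b := by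
        rw [pvGet_foldl_insert]
        rcases Bool.or_eq_true_iff.mp hm with h | h
        · by_cases hvc : vs.contains s <;>
            simp [beq_iff_eq.mp h, PySem.Dict.get?_insert_self]
        · rw [if_pos h]
      have hm' : s = b ∨ s ∈ vs := by simpa using hsmem
      simp [pvAssocCanon, hm', hv]
    · -- s not in the head group
      have hsb : s ≠ b := fun h => hm (by simp [h])
      have hsv : s ∉ vs := fun h => hm (by simp [h])
      have hval : (vs.foldl (fun d v => d.insert v b) (d.insert b b)).get? s = d.get? s := by
        rw [pvGet_foldl_insert]
        simp [hsv, PySem.Dict.get?_insert_of_ne _ _ hsb]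
      have hcan : pvAssocCanon s ((b, vs) :: rest) = pvAssocCanon s rest := by
        simp [pvAssocCanon, hsb, hsv]
      rw [hcan]
      cases pvAssocCanon s rest <;> simp [hval]

lemma pvCanon_get (s : String) : pvCanon.get? s = pvAssocCanon s pvVariations := by
  have hnd : (pvFlatKeys pvVariations).Nodup := by decide
  rw [pvCanon, pvGet_build pvVariations PySem.Dict.empty s hnd]
  cases pvAssocCanon s pvVariations <;> simp

-- A's group loop computes exactly B's "both canonical forms exist and agree" test (for distinct inputs)
lemma pvLoopA_eq (s1 s2 : String) (hne : s1 ≠ s2) (L : List (String × List String))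
    (hnd : (pvFlatKeys L).Nodup) :
    pvLoopA s1 s2 L
      = ((pvAssocCanon s1 L).isSome && (pvAssocCanon s1 L == pvAssocCanon s2 L)) := by
  induction L with
  | nil => simp [pvLoopA, pvAssocCanon]
  | cons p rest ih =>
    obtain ⟨b, vs⟩ := p
    rw [pvFlatKeys_cons, List.nodup_append] at hnd
    obtain ⟨hhead, hnd', hdisj⟩ := hnd
    have hnotmem : ∀ s : String, (s == b || vs.contains s) = true → s ∉ pvFlatKeys rest := by
      intro s hm hmem
      have hsmem : s ∈ b :: vs := by
        rcases Bool.or_eq_true_iff.mp hm with h | h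
        · simp [beq_iff_eq.mp h]
        · simp [List.contains_iff_mem.mp h]
      exact hdisj s hsmem s hmem rfl
    have hbv : b ∉ vs := (List.nodup_cons.mp hhead).1
    by_cases hm1 : (s1 == b || vs.contains s1) = true
    · by_cases hm2 : (s2 == b || vs.contains s2) = true
      · -- both in head group: loop fires, both canon = some b
        have hloop : pvLoopA s1 s2 ((b, vs) :: rest) = true := by
          rcases Bool.or_eq_true_iff.mp hm1 with h1 | h1 <;>
            rcases Bool.or_eq_true_iff.mp hm2 with h2 | h2
          · exact absurd (beq_iff_eq.mp h1 ▸ beq_iff_eq.mp h2 ▸ rfl) (Ne.symm hne)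
          · simp [pvLoopA, beq_iff_eq.mp h1, List.contains_iff_mem.mp h2]
          · have hs1b : s1 ≠ b := fun h => hbv (h ▸ List.contains_iff_mem.mp h1)
            simp [pvLoopA, hs1b, beq_iff_eq.mp h2, List.contains_iff_mem.mp h1]
          · have hs1b : s1 ≠ b := fun h => hbv (h ▸ List.contains_iff_mem.mp h1)
            have hs2b : s2 ≠ b := fun h => hbv (h ▸ List.contains_iff_mem.mp h2)
            simp [pvLoopA, hs1b, hs2b, List.contains_iff_mem.mp h1, List.contains_iff_mem.mp h2]
        have hc1 : pvAssocCanon s1 ((b, vs) :: rest) = some b := by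
          simp only [pvAssocCanon, hm1, if_true]
        have hc2 : pvAssocCanon s2 ((b, vs) :: rest) = some b := by
          simp only [pvAssocCanon, hm2, if_true]
        simp [hloop, hc1, hc2]
      · -- s1 in head group, s2 not: head tests fail, recursion is false; canons differ
        have hs2b : s2 ≠ b := fun h => hm2 (by simp [h])
        have hs2v : s2 ∉ vs := fun h => hm2 (by simp [h])
        have hcond : pvLoopA s1 s2 ((b, vs) :: rest) = pvLoopA s1 s2 rest := by
          simp [pvLoopA, hs2b, hs2v]
        have h1none : pvAssocCanon s1 rest = none :=
          pvAssocCanon_of_not_mem s1 rest (hnotmem s1 hm1)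
        have hrec : pvLoopA s1 s2 rest = false := by
          rw [ih hnd', h1none]; rfl
        have hne2 : pvAssocCanon s2 rest ≠ some b := by
          intro h
          exact hnotmem b (by simp) (pvAssocCanon_mem s2 b rest h)
        rw [hcond, hrec]
        have hc1 : pvAssocCanon s1 ((b, vs) :: rest) = some b := by
          simp only [pvAssocCanon, hm1, if_true]
        have hc2 : pvAssocCanon s2 ((b, vs) :: rest) = pvAssocCanon s2 rest := by
          simp [pvAssocCanon, hs2b, hs2v]
        rw [hc1, hc2]
        cases h : pvAssocCanon s2 rest with
        | none => simp
        | some c =>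
          have hbc : b ≠ c := fun hbc => hne2 (hbc ▸ h)
          simp [hbc]
    · have hs1b : s1 ≠ b := fun h => hm1 (by simp [h])
      have hs1v : s1 ∉ vs := fun h => hm1 (by simp [h])
      have hc1 : pvAssocCanon s1 ((b, vs) :: rest) = pvAssocCanon s1 rest := by
        simp [pvAssocCanon, hs1b, hs1v]
      by_cases hm2 : (s2 == b || vs.contains s2) = true
      · -- symmetric: s2 in head group, s1 not
        have hcond : pvLoopA s1 s2 ((b, vs) :: rest) = pvLoopA s1 s2 rest := by
          simp [pvLoopA, hs1b, hs1v]
        have h2none : pvAssocCanon s2 rest = none :=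
          pvAssocCanon_of_not_mem s2 rest (hnotmem s2 hm2)
        have hc2 : pvAssocCanon s2 ((b, vs) :: rest) = some b := by
          simp only [pvAssocCanon, hm2, if_true]
        rw [hcond, ih hnd', hc1, hc2]
        cases h : pvAssocCanon s1 rest with
        | none => simp [h2none]
        | some c =>
          have hcb : c ≠ b := fun hcb =>
            hnotmem b (by simp) (hcb ▸ pvAssocCanon_mem s1 c rest h)
          simp [h2none, hcb]
      · -- neither in head group
        have hs2b : s2 ≠ b := fun h => hm2 (by simp [h])
        have hs2v : s2 ∉ vs := fun h => hm2 (by simp [h])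
        have hcond : pvLoopA s1 s2 ((b, vs) :: rest) = pvLoopA s1 s2 rest := by
          simp [pvLoopA, hs2b, hs2v]
        have hc2 : pvAssocCanon s2 ((b, vs) :: rest) = pvAssocCanon s2 rest := by
          simp [pvAssocCanon, hs2b, hs2v]
        rw [hcond, hc1, hc2, ih hnd']

-- ===== VERDICT (by name: the statement is the Claim_ definition above) =====
theorem skills_match_py_spec : Claim_equal_skills_match_py := by
  intro s1 s2 _
  unfold Spec_skills_match_py skills_match_py skills_match_py_alt
  by_cases h : s1 == s2
  · simp [h]
  · have hne : s1 ≠ s2 := by simpa [beq_iff_eq] using h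
    have hnd : (pvFlatKeys pvVariations).Nodup := by decide
    simp only [h, pvCanon_get, ← pvLoopA_eq s1 s2 hne pvVariations hnd]
    cases hl : pvLoopA s1 s2 pvVariations
    · simp only [Bool.false_eq_true, if_false]
      by_cases hlen : 3 < PySem.Str.len s1 ∧ 3 < PySem.Str.len s2
      · cases hsub : (PySem.Str.isIn s1 s2 || PySem.Str.isIn s2 s1) <;>
          simp [PySem.Str.len]
      · have hno : ¬ (3 < PySem.Str.len s1 ∧ 3 < PySem.Str.len s2 ∧
            (PySem.Str.isIn s1 s2 || PySem.Str.isIn s2 s1) = true) := by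
          intro h3; exact hlen ⟨h3.1, h3.2.1⟩
        simp only [if_neg hlen, if_neg hno]
    · simp
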